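-- pv_equiv track=rewrite | github.com/Superb-Man/Cryptography | Extra/Public-Key-Cryptography/AES.py | shiftRight
-- ===== SOURCE A (Python) =====
-- import copy
--
-- def shiftRight(mat) :
--     newmat = []
--     for i in range(4) :
--         nrow = copy.copy(mat[i])
--         for j in range (i) :
--             nrow.insert(0,nrow.pop())
--         newmat.append(nrow)
--
--     return newmat
-- ===== SOURCE B (Python) =====
-- def shiftRight(mat):
--     return [[mat[i][(j - i) % len(mat[i])] for j in range(len(mat[i]))]
--             for i in range(4)]
-- ===== Notes on version B (the rewrite author's own statement) =====
-- stated objective: simpler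
-- what changed: Replaces per-row iterated pop()/insert(0,...) rotation with a direct modular-index gather comprehension mat[i][(j - i) % 4]; no row copying or in-place mutation.
import Mathlib
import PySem

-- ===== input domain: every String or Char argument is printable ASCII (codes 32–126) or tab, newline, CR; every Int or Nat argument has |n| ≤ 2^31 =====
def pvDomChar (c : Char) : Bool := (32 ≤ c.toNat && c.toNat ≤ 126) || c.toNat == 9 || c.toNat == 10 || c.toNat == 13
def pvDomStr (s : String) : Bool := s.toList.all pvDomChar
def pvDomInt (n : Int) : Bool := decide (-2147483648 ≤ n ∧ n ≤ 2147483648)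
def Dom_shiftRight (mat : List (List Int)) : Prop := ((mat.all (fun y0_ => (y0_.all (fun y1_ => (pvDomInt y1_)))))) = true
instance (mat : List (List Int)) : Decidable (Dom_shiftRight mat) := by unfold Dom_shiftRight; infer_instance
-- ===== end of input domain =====

-- B replaces A's per-row repeated pop()/insert(0,..) rotation by a direct modular-index
-- gather comprehension (simpler; no copying or mutation of the argument; return values equal on Pre_).

-- ===== PORT A =====
-- one step of A's inner loop: nrow.insert(0, nrow.pop()); Python raises IndexError on an
-- empty row — those inputs are excluded by Pre_ (the 'r' branch is never reached under Pre_)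
def rotStepA (r : List Int) : List Int :=
  match PySem.List.pop? r with
  | some (x, rest) => PySem.List.insert rest 0 x
  | none => r

-- mat[i]; Python raises IndexError when i is out of range — excluded by Pre_ (4 ≤ length)
def rowA (mat : List (List Int)) (i : Int) : List Int :=
  (PySem.List.pyGet? mat i).getD []

def shiftRight (mat : List (List Int)) : List (List Int) :=
  (PySem.List.pyRange 0 4 1).foldl (fun newmat i =>
    newmat ++ [(PySem.List.pyRange 0 i 1).foldl (fun nrow _ => rotStepA nrow) (rowA mat i)]) []

-- ===== PORT B =====
-- the inner comprehension of Source B with r = mat[i]: [mat[i][(j - i) % len(mat[i])] for j in range(len(mat[i]))]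
def gatherRow (i : Int) (r : List Int) : List Int :=
  (PySem.List.pyRange 0 (r.length : Int) 1).map
    (fun j => PySem.List.pyGetD r (PySem.Int.mod (j - i) (r.length : Int)) 0)

-- mat[i] on B's side; Python raises IndexError when i is out of range — excluded by Pre_
def rowB (mat : List (List Int)) (i : Int) : List Int :=
  (PySem.List.pyGet? mat i).getD []

def shiftRight_alt (mat : List (List Int)) : List (List Int) :=
  (PySem.List.pyRange 0 4 1).map (fun i => gatherRow i (rowB mat i))

-- ===== PRECONDITION & SPEC =====
-- Exactly where A returns: mat[0..3] must exist (else mat[i] raises IndexError) and rows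
-- 1..3 must be nonempty (else nrow.pop() raises IndexError); row 0 is never popped.
def Pre_shiftRight (mat : List (List Int)) : Prop :=
  4 ≤ mat.length ∧ ∀ r ∈ (mat.drop 1).take 3, r ≠ []
instance (mat : List (List Int)) : Decidable (Pre_shiftRight mat) := by
  unfold Pre_shiftRight; infer_instance

def pvWitness_shiftRight : List (List Int) :=
  [[1,2,3,4],[5,6,7,8],[9,10,11,12],[13,14,15,16]]

def Spec_shiftRight (mat : List (List Int)) (out : List (List Int)) : Prop := out = shiftRight_alt mat
instance (mat : List (List Int)) (out : List (List Int)) : Decidable (Spec_shiftRight mat out) := by unfold Spec_shiftRight; infer_instance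

-- ===== CLAIM (what is proved, stated in full; the proofs are below) =====
def Claim_equal_shiftRight : Prop := ∀ (mat : List (List Int)), Dom_shiftRight mat → Pre_shiftRight mat → Spec_shiftRight mat (shiftRight mat)

-- ===== LEMMAS AND PROOFS =====

theorem gatherRow_length (i : Int) (r : List Int) : (gatherRow i r).length = r.length := by
  simp [gatherRow, PySem.List.pyRange_zero_natCast]

theorem gatherRow_getElem (i : Int) (r : List Int) (k : Nat) (hk : k < r.length) :
    (gatherRow i r)[k]'(by rw [gatherRow_length]; exact hk) =
      PySem.List.pyGetD r (PySem.Int.mod ((k : Int) - i) (r.length : Int)) 0 := by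
  simp [gatherRow, PySem.List.pyRange_zero_natCast]

theorem gatherRow_zero (r : List Int) : gatherRow 0 r = r := by
  apply List.ext_getElem (gatherRow_length 0 r)
  intro k h1 h2
  rw [gatherRow_getElem 0 r k h2]
  have hpos : (0 : Int) < (r.length : Int) := by exact_mod_cast Nat.lt_of_le_of_lt (Nat.zero_le k) h2
  rw [PySem.Int.mod_eq_emod_of_pos hpos]
  have : ((k : Int) - 0) % (r.length : Int) = (k : Int) := by
    rw [sub_zero]; exact Int.emod_eq_of_lt (by positivity) (by exact_mod_cast h2)
  rw [this, PySem.List.pyGetD_eq_getElem r 0 (by positivity) (by exact_mod_cast h2)]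
  simp

theorem gatherRow_ne_nil (i : Int) (r : List Int) (h : r ≠ []) : gatherRow i r ≠ [] := by
  intro hc
  have := gatherRow_length i r
  rw [hc] at this
  exact h (List.eq_nil_of_length_eq_zero this.symm)

theorem rotStepA_eq (g : List Int) (hg : g ≠ []) :
    rotStepA g = g.getLast hg :: g.dropLast := by
  rcases List.eq_nil_or_concat g with rfl | ⟨ys, y, rfl⟩
  · exact absurd rfl hg
  · simp [rotStepA, PySem.List.pop?_last, PySem.List.insert_zero]

theorem gatherRow_succ (i : Int) (r : List Int) (h : r ≠ []) :
    gatherRow (i + 1) r = rotStepA (gatherRow i r) := by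
  have hg : gatherRow i r ≠ [] := gatherRow_ne_nil i r h
  rw [rotStepA_eq (gatherRow i r) hg]
  have hn : 0 < r.length := List.length_pos_iff.mpr h
  have hnpos : (0 : Int) < (r.length : Int) := by exact_mod_cast hn
  apply List.ext_getElem
  · simp [gatherRow_length]
    omega
  intro k h1 h2
  rw [gatherRow_getElem (i+1) r k (by rw [gatherRow_length] at h1; exact h1)]
  match k with
  | 0 =>
    simp only [List.getElem_cons_zero]
    rw [List.getLast_eq_getElem]
    rw [gatherRow_getElem i r ((gatherRow i r).length - 1)
      (by rw [gatherRow_length] at *; omega)]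
    congr 1
    rw [gatherRow_length, PySem.Int.mod_eq_emod_of_pos hnpos, PySem.Int.mod_eq_emod_of_pos hnpos]
    have hcast : ((r.length - 1 : Nat) : Int) = (r.length : Int) - 1 := by omega
    rw [hcast]
    have : (r.length : Int) - 1 - i = ((0:Int) - (i + 1)) + (r.length : Int) * 1 := by ring
    rw [this, Int.add_mul_emod_self_left]
    norm_num
  | Nat.succ m =>
    simp only [List.getElem_cons_succ]
    rw [List.getElem_dropLast]
    rw [gatherRow_getElem i r m (by rw [gatherRow_length] at h1; omega)]
    congr 2
    push_cast
    ring

theorem shiftRight_spec : Claim_equal_shiftRight := by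
  intro mat _ hpre
  obtain ⟨h4, hne⟩ := hpre
  match mat with
  | [] => exact absurd h4 (by simp)
  | [_] => exact absurd h4 (by simp)
  | [_, _] => exact absurd h4 (by simp)
  | [_, _, _] => exact absurd h4 (by simp)
  | a :: b :: c :: d :: rest =>
    have hb : b ≠ [] := hne b (by simp)
    have hc : c ≠ [] := hne c (by simp)
    have hd : d ≠ [] := hne d (by simp)
    show shiftRight (a :: b :: c :: d :: rest) = shiftRight_alt (a :: b :: c :: d :: rest)
    have hL : shiftRight (a :: b :: c :: d :: rest) =
        [a, rotStepA b, rotStepA (rotStepA c), rotStepA (rotStepA (rotStepA d))] := by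
      simp [shiftRight, rowA, show PySem.List.pyRange 0 4 1 = [0,1,2,3] from rfl,
        show PySem.List.pyRange 0 0 1 = [] from rfl, show PySem.List.pyRange 0 1 1 = [0] from rfl,
        show PySem.List.pyRange 0 2 1 = [0,1] from rfl, show PySem.List.pyRange 0 3 1 = [0,1,2] from rfl,
        PySem.List.pyGet?, PySem.List.pyIdx?]
      refine ⟨?_, ?_, ?_, ?_⟩ <;> rw [if_pos (by omega)] <;> simp
    have hR : shiftRight_alt (a :: b :: c :: d :: rest) =
        [gatherRow 0 a, gatherRow 1 b, gatherRow 2 c, gatherRow 3 d] := by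
      simp [shiftRight_alt, rowB, show PySem.List.pyRange 0 4 1 = [0,1,2,3] from rfl,
        PySem.List.pyGet?, PySem.List.pyIdx?]
      refine ⟨?_, ?_, ?_, ?_⟩ <;> rw [if_pos (by omega)] <;> simp
    have g1 : ∀ (r : List Int), r ≠ [] → gatherRow 1 r = rotStepA r := by
      intro r hr
      have := gatherRow_succ 0 r hr
      rw [gatherRow_zero] at this
      norm_num at this
      exact this
    have g2 : gatherRow 2 c = rotStepA (rotStepA c) := by
      have := gatherRow_succ 1 c hc
      norm_num at this
      rw [this, g1 c hc]
    have g3 : gatherRow 3 d = rotStepA (rotStepA (rotStepA d)) := by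
      have h2 := gatherRow_succ 2 d hd
      norm_num at h2
      have h1 := gatherRow_succ 1 d hd
      norm_num at h1
      rw [h2, h1, g1 d hd]
    rw [hL, hR, gatherRow_zero, g1 b hb, g2, g3]
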